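-- pv_equiv track=rewrite | github.com/chenjienan/python-leetcode | OA/Microsoft/max_inserts_to_Obtain_str_without_three_char_a.py | maxInsert
-- ===== SOURCE A (Python) =====
-- def maxInsert(s):
--     if not s or len(s) == 0:
--         return 2
--
--     res = 0
--     count = 0
--     s = 'X' + s + 'X'   # can insert a before and after
--     for i in range(len(s) - 1):
--         if s[i] == 'a':
--             count += 1
--             if s[i+1] != 'a' and count < 2:
--                 res += 1
--
--         if s[i] != 'a':
--             count = 0
--             if s[i+1] != 'a':
--                 res += 2
--
--         if count > 2:
--             return -1
--
--     return res
-- ===== SOURCE B (Python) =====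
-- def maxInsert(s):
--     if not s:
--         return 2
--     if 'aaa' in s:
--         return -1
--     return 2 * len(s) - 3 * s.count('a') + 2
-- ===== Notes on version B (the rewrite author's own statement) =====
-- stated objective: simpler
-- what changed: Replaces the stateful run-counting scan over the padded string with a substring membership test for a run of three consecutive a-characters plus a closed-form count expression.
import Mathlib
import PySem

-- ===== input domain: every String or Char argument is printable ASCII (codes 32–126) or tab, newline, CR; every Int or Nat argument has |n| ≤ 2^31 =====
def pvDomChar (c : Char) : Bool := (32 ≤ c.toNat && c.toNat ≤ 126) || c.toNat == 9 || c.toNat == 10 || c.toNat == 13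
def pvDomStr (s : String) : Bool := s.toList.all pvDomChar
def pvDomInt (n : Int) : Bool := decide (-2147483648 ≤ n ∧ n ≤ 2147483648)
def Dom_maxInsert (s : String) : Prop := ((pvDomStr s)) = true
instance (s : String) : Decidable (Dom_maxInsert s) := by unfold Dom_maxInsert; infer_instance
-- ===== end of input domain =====

-- B replaces A's stateful run-counting scan by a substring test plus the closed form
-- 2*len(s) - 3*s.count('a') + 2 (simpler; measured faster by a constant factor).

-- ===== PORT A =====
-- loop body of A's `for i in range(len(s) - 1)`; state none = "the loop returned -1"
def maxInsertStep (cs : List Char) (st : Option (Int × Int)) (i : Int) : Option (Int × Int) :=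
  match st with
  | none => none
  | some (res, count) =>
    let c1 := PySem.List.pyGetD cs i 'X'        -- s[i]; i is always in range here
    let c2 := PySem.List.pyGetD cs (i + 1) 'X'  -- s[i+1]
    let count := if c1 = 'a' then count + 1 else count
    let res := if c1 = 'a' ∧ c2 ≠ 'a' ∧ count < 2 then res + 1 else res
    let count := if c1 ≠ 'a' then 0 else count
    let res := if c1 ≠ 'a' ∧ c2 ≠ 'a' then res + 2 else res
    if count > 2 then none else some (res, count)

def maxInsert (s : String) : Int :=
  if PySem.Str.len s = 0 then 2   -- `not s or len(s) == 0`: both disjuncts are the emptiness test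
  else
    -- s = 'X' + s + 'X'
    match (PySem.List.pyRange 0 ((('X' :: s.toList ++ ['X']).length : Int) - 1) 1).foldl
        (maxInsertStep ('X' :: s.toList ++ ['X'])) (some (0, 0)) with
    | none => -1        -- the early `return -1`
    | some (res, _) => res

-- ===== PORT B =====
def maxInsert_alt (s : String) : Int :=
  if PySem.Str.len s = 0 then 2                      -- `if not s`
  else if PySem.Str.isIn "aaa" s then -1             -- `if 'aaa' in s`
  else 2 * (PySem.Str.len s : Int) - 3 * (PySem.Str.count s "a" : Int) + 2

-- ===== PRECONDITION & SPEC =====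
def Spec_maxInsert (s : String) (out : Int) : Prop := out = maxInsert_alt s
instance (s : String) (out : Int) : Decidable (Spec_maxInsert s out) := by unfold Spec_maxInsert; infer_instance

-- ===== CLAIM (what is proved, stated in full; the proofs are below) =====
def Claim_equal_maxInsert : Prop := ∀ (s : String), Dom_maxInsert s → Spec_maxInsert s (maxInsert s)

-- ===== LEMMAS AND PROOFS =====

-- pair-walk reformulation of A's loop: processes the pairs (l[i], l[i+1])
def pvWalk : List Char → Int → Int → Int
  | c1 :: c2 :: rest, res, count =>
      let count' := if c1 = 'a' then count + 1 else count
      let res1 := if c1 = 'a' ∧ c2 ≠ 'a' ∧ count' < 2 then res + 1 else res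
      let count'' := if c1 ≠ 'a' then 0 else count'
      let res2 := if c1 ≠ 'a' ∧ c2 ≠ 'a' then res1 + 2 else res1
      if count'' > 2 then -1 else pvWalk (c2 :: rest) res2 count''
  | _, res, _ => res

-- "A returns -1": the incoming run count k plus a leading run reaches 3, or a later run of 3
def pvBad : Int → List Char → Bool
  | k, c :: rest => if c = 'a' then (if k + 1 > 2 then true else pvBad (k + 1) rest) else pvBad 0 rest
  | _, [] => false

-- what A adds to res over t (followed by the closing 'X'), entering with run count k
def pvG : Int → List Char → Int
  | k, c :: rest =>
      let nxt := rest.headD 'X'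
      if c = 'a' then (if nxt ≠ 'a' ∧ k + 1 < 2 then 1 else 0) + pvG (k + 1) rest
      else (if nxt ≠ 'a' then 2 else 0) + pvG 0 rest
  | _, [] => 0

def pvFin : Option (Int × Int) → Int
  | none => -1
  | some (res, _) => res

lemma pvWalk_cons_a (c2 : Char) (rest : List Char) (res count : Int) :
    pvWalk ('a' :: c2 :: rest) res count =
      if count + 1 > 2 then -1
      else pvWalk (c2 :: rest) (if c2 ≠ 'a' ∧ count + 1 < 2 then res + 1 else res) (count + 1) := by
  simp [pvWalk]

lemma pvWalk_cons_na (c1 c2 : Char) (rest : List Char) (res count : Int) (h : c1 ≠ 'a') :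
    pvWalk (c1 :: c2 :: rest) res count =
      pvWalk (c2 :: rest) (if c2 ≠ 'a' then res + 2 else res) 0 := by
  simp [pvWalk, h, show ¬ ((0:Int) > 2) by omega]

lemma pvBad_cons_a (rest : List Char) (k : Int) :
    pvBad k ('a' :: rest) = if k + 1 > 2 then true else pvBad (k + 1) rest := by
  simp [pvBad]

lemma pvBad_cons_na (c : Char) (rest : List Char) (k : Int) (h : c ≠ 'a') :
    pvBad k (c :: rest) = pvBad 0 rest := by
  simp [pvBad, h]

lemma pvG_cons_a (rest : List Char) (k : Int) :
    pvG k ('a' :: rest) =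
      (if rest.headD 'X' ≠ 'a' ∧ k + 1 < 2 then 1 else 0) + pvG (k + 1) rest := by
  simp [pvG]

lemma pvG_cons_na (c : Char) (rest : List Char) (k : Int) (h : c ≠ 'a') :
    pvG k (c :: rest) = (if rest.headD 'X' ≠ 'a' then 2 else 0) + pvG 0 rest := by
  simp [pvG, h]

lemma foldl_step_none (cs : List Char) (l : List Int) :
    l.foldl (maxInsertStep cs) none = none := by
  induction l with
  | nil => rfl
  | cons x xs ih => simpa [maxInsertStep] using ih

lemma fold_eq_walk (cs : List Char) : ∀ (d j : Nat) (res count : Int),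
    cs.length = j + 1 + d →
    pvFin ((PySem.List.pyRange (j : Int) ((cs.length : Int) - 1) 1).foldl
      (maxInsertStep cs) (some (res, count))) = pvWalk (cs.drop j) res count := by
  intro d
  induction d with
  | zero =>
    intro j res count h
    rw [PySem.List.pyRange_one_eq_nil (by omega)]
    have hdrop : cs.drop j = [cs[j]'(by omega)] := by
      rw [List.drop_eq_getElem_cons (by omega), List.drop_eq_nil_of_le (by omega)]
    rw [hdrop]
    rfl
  | succ d ih =>
    intro j res count h
    rw [PySem.List.pyRange_one_cons (by omega)]
    have hjl : j < cs.length := by omega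
    have hjl1 : j + 1 < cs.length := by omega
    have hcast : ((j : Int) + 1) = ((j + 1 : Nat) : Int) := by push_cast; ring
    have hdrop : cs.drop j = cs[j] :: cs[j+1] :: cs.drop (j + 2) := by
      rw [List.drop_eq_getElem_cons (by omega),
          List.drop_eq_getElem_cons (show j + 1 < cs.length by omega)]
    rw [hdrop]
    show pvFin (List.foldl _ (maxInsertStep cs (some (res, count)) (j : Int)) _) = _
    have hg1 : PySem.List.pyGetD cs (j : Int) 'X' = cs[j] := by
      simp [List.getD_eq_getElem?_getD, List.getElem?_eq_getElem hjl]
    have hg2 : PySem.List.pyGetD cs ((j : Int) + 1) 'X' = cs[j+1] := by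
      rw [hcast, PySem.List.pyGetD_natCast]
      simp [List.getD_eq_getElem?_getD, List.getElem?_eq_getElem hjl1]
    rw [maxInsertStep, hg1, hg2, pvWalk]
    generalize (if cs[j] = 'a' then count + 1 else count) = K1
    generalize (if cs[j] = 'a' ∧ cs[j+1] ≠ 'a' ∧ K1 < 2 then res + 1 else res) = R1
    generalize (if cs[j] ≠ 'a' then (0:Int) else K1) = K2
    generalize (if cs[j] ≠ 'a' ∧ cs[j+1] ≠ 'a' then R1 + 2 else R1) = R2
    by_cases hC : K2 > 2
    · rw [if_pos hC, if_pos hC, foldl_step_none]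
      rfl
    · rw [if_neg hC, if_neg hC]
      have hih := ih (j + 1) R2 K2 (by omega)
      rw [List.drop_eq_getElem_cons (show j + 1 < cs.length by omega)] at hih
      rw [hcast, hih]

lemma walk_eval : ∀ (t : List Char) (res count : Int), 0 ≤ count → count ≤ 2 →
    pvWalk (t ++ ['X']) res count = if pvBad count t then -1 else res + pvG count t := by
  intro t
  induction t with
  | nil => intro res count _ _; simp [pvWalk, pvBad, pvG]
  | cons c rest ih =>
    intro res count h0 h2
    have hx : (c :: rest) ++ ['X'] = c :: (rest.headD 'X') :: (rest ++ ['X']).tail := by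
      cases rest <;> simp
    have htl : (rest.headD 'X') :: (rest ++ ['X']).tail = rest ++ ['X'] := by
      cases rest <;> simp
    by_cases ha : c = 'a'
    · subst ha
      rw [hx, pvWalk_cons_a, htl, pvBad_cons_a, pvG_cons_a]
      by_cases hcnt : count + 1 > 2
      · rw [if_pos hcnt, if_pos hcnt]
        simp
      · rw [if_neg hcnt, if_neg hcnt, ih _ (count + 1) (by omega) (by omega)]
        by_cases hb : pvBad (count + 1) rest
        · simp [hb]
        · simp only [hb, Bool.false_eq_true, if_false]
          by_cases hinc : rest.headD 'X' ≠ 'a' ∧ count + 1 < 2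
          · rw [if_pos hinc, if_pos hinc]; ring
          · rw [if_neg hinc, if_neg hinc]; ring
    · rw [hx, pvWalk_cons_na _ _ _ _ _ ha, htl, pvBad_cons_na _ _ _ ha, pvG_cons_na _ _ _ ha,
        ih _ 0 le_rfl (by omega)]
      by_cases hb : pvBad 0 rest
      · simp [hb]
      · simp only [hb, Bool.false_eq_true, if_false]
        by_cases hn : rest.headD 'X' ≠ 'a'
        · rw [if_pos hn, if_pos hn]; ring
        · rw [if_neg hn, if_neg hn]; ring

lemma prefix_aa_a (rest : List Char) (h : ['a','a'] <+: rest) : ['a'] <+: rest :=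
  List.IsPrefix.trans ⟨['a'], rfl⟩ h

lemma bad_iff : ∀ (t : List Char),
    (pvBad 0 t = true ↔ ['a','a','a'] <:+: t) ∧
    (pvBad 1 t = true ↔ (['a','a'] <+: t ∨ ['a','a','a'] <:+: t)) ∧
    (pvBad 2 t = true ↔ (['a'] <+: t ∨ ['a','a','a'] <:+: t)) := by
  intro t
  induction t with
  | nil =>
    refine ⟨?_, ?_, ?_⟩ <;> simp [pvBad]
  | cons c rest ih =>
    obtain ⟨ih0, ih1, ih2⟩ := ih
    by_cases ha : c = 'a'
    · subst ha
      refine ⟨?_, ?_, ?_⟩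
      · rw [pvBad_cons_a, if_neg (by omega : ¬ ((0:Int) + 1 > 2)),
          show (0:Int) + 1 = 1 from by norm_num, ih1]
        rw [List.infix_cons_iff]
        constructor
        · rintro (hp | hi)
          · exact Or.inl (List.cons_prefix_cons.mpr ⟨rfl, hp⟩)
          · exact Or.inr hi
        · rintro (hp | hi)
          · exact Or.inl (List.cons_prefix_cons.mp hp).2
          · exact Or.inr hi
      · rw [pvBad_cons_a, if_neg (by omega : ¬ ((1:Int) + 1 > 2)),
          show (1:Int) + 1 = 2 from by norm_num, ih2]
        rw [List.infix_cons_iff]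
        constructor
        · rintro (hp | hi)
          · exact Or.inl (List.cons_prefix_cons.mpr ⟨rfl, hp⟩)
          · exact Or.inr (Or.inr hi)
        · rintro (hp | hp | hi)
          · exact Or.inl (List.cons_prefix_cons.mp hp).2
          · exact Or.inl (prefix_aa_a rest (List.cons_prefix_cons.mp hp).2)
          · exact Or.inr hi
      · rw [pvBad_cons_a, if_pos (by omega : (2:Int) + 1 > 2)]
        simp [List.cons_prefix_cons]
    · refine ⟨?_, ?_, ?_⟩ <;>
        rw [pvBad_cons_na _ _ _ ha, ih0, List.infix_cons_iff]
      · constructor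
        · exact fun hi => Or.inr hi
        · rintro (hp | hi)
          · exact absurd (List.cons_prefix_cons.mp hp).1.symm ha
          · exact hi
      · constructor
        · exact fun hi => Or.inr (Or.inr hi)
        · rintro (hp | hp | hi)
          · exact absurd (List.cons_prefix_cons.mp hp).1.symm ha
          · exact absurd (List.cons_prefix_cons.mp hp).1.symm ha
          · exact hi
      · constructor
        · exact fun hi => Or.inr (Or.inr hi)
        · rintro (hp | hp | hi)
          · exact absurd (List.cons_prefix_cons.mp hp).1.symm ha
          · exact absurd (List.cons_prefix_cons.mp hp).1.symm ha
          · exact hi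

lemma g_eval : ∀ (t : List Char) (k : Int), 0 ≤ k → k ≤ 2 → pvBad k t = false →
    pvG k t = 2 * (t.length : Int) - 3 * (t.count 'a' : Int) +
      (if t.headD 'X' = 'a' then 2 - k else 0) := by
  intro t
  induction t with
  | nil => intro k _ _ _; simp [pvG]
  | cons c rest ih =>
    intro k h0 h2 hb
    by_cases ha : c = 'a'
    · subst ha
      rw [pvBad_cons_a] at hb
      by_cases hc : k + 1 > 2
      · rw [if_pos hc] at hb; exact absurd hb (by simp)
      · rw [if_neg hc] at hb
        rw [pvG_cons_a, ih (k + 1) (by omega) (by omega) hb, List.count_cons]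
        simp only [List.headD_cons, if_pos rfl, beq_self_eq_true]
        by_cases hn : rest.headD 'X' = 'a'
        · simp only [hn, ne_eq, not_true_eq_false, false_and, if_false, if_pos rfl]
          push_cast [List.length_cons]
          omega
        · simp only [hn, ne_eq, not_false_eq_true, true_and, if_neg hn]
          by_cases hk : k + 1 < 2
          · rw [if_pos hk]
            push_cast [List.length_cons]
            omega
          · rw [if_neg hk]
            push_cast [List.length_cons]
            omega
    · rw [pvBad_cons_na _ _ _ ha] at hb
      rw [pvG_cons_na _ _ _ ha, ih 0 le_rfl (by omega) hb, List.count_cons]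
      have hbeq : (c == 'a') = false := by simp [ha]
      simp only [List.headD_cons, if_neg ha, hbeq, Bool.false_eq_true, if_false]
      by_cases hn : rest.headD 'X' = 'a'
      · simp only [hn, ne_eq, not_true_eq_false, if_false, if_pos rfl]
        push_cast [List.length_cons]
        omega
      · simp only [hn, ne_eq, not_false_eq_true, if_true, if_neg hn]
        push_cast [List.length_cons]
        omega

lemma count_go_singleton (c : Char) : ∀ (fuel : Nat) (l : List Char) (acc : Nat),
    l.length ≤ fuel → PySem.Chars.count.go [c] fuel l acc = acc + l.count c := by
  intro fuel
  induction fuel with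
  | zero =>
    intro l acc h
    cases l with
    | nil => rfl
    | cons x xs => simp at h
  | succ f ih =>
    intro l acc h
    cases l with
    | nil => rfl
    | cons x xs =>
      rw [PySem.Chars.count.go]
      by_cases hx : x = c
      · simp [hx, List.isPrefixOf, ih xs (acc + 1) (by simpa using h), List.count_cons]
        omega
      · have hpre : List.isPrefixOf [c] (x :: xs) = false := by
          simp [List.isPrefixOf]
          intro h'; exact hx h'.symm
        simp [hpre, ih xs acc (by simpa using h), List.count_cons, hx]

lemma str_count_single (s : String) : PySem.Str.count s "a" = s.toList.count 'a' := by
  rw [PySem.Str.count_eq]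
  show PySem.Chars.count s.toList "a".toList = _
  have h1 : "a".toList = ['a'] := rfl
  rw [h1, PySem.Chars.count]
  simp only [List.isEmpty_cons, Bool.false_eq_true, if_false]
  simpa using count_go_singleton 'a' s.toList.length s.toList 0 (le_refl _)

-- ===== VERDICT (by name: the statement is the Claim_ definition above) =====
theorem maxInsert_spec : Claim_equal_maxInsert := by
  intro s _
  unfold Spec_maxInsert maxInsert maxInsert_alt
  by_cases hs : PySem.Str.len s = 0
  · rw [if_pos hs, if_pos hs]
  · rw [if_neg hs, if_neg hs]
    have hlen : PySem.Str.len s = (s.toList.length : Nat) := by simp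
    have ht : s.toList ≠ [] := by
      intro hnil; apply hs; rw [hlen, hnil]; rfl
    obtain ⟨t0, tt, htt⟩ := List.exists_cons_of_ne_nil ht
    have hcs : ('X' :: s.toList ++ ['X']).length = 0 + 1 + (s.toList.length + 1) := by
      simp only [List.cons_append, List.length_cons, List.length_append, List.length_cons,
        List.length_nil]
      omega
    have hfold := fold_eq_walk ('X' :: s.toList ++ ['X']) (s.toList.length + 1) 0 0 0 hcs
    simp only [Nat.cast_zero, List.drop_zero] at hfold
    have hA : (match (PySem.List.pyRange 0 ((('X' :: s.toList ++ ['X']).length : Int) - 1) 1).foldl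
        (maxInsertStep ('X' :: s.toList ++ ['X'])) (some ((0:Int), (0:Int))) with
        | none => (-1 : Int)
        | some (res, _) => res) = pvWalk ('X' :: s.toList ++ ['X']) 0 0 := by
      rcases hF : (PySem.List.pyRange 0 ((('X' :: s.toList ++ ['X']).length : Int) - 1) 1).foldl
        (maxInsertStep ('X' :: s.toList ++ ['X'])) (some ((0:Int), (0:Int))) with _ | ⟨r, cnt⟩
      · rw [hF] at hfold
        simpa [pvFin] using hfold
      · rw [hF] at hfold
        simpa [pvFin] using hfold
    rw [hA]
    have hwalk : pvWalk ('X' :: s.toList ++ ['X']) 0 0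
        = pvWalk (s.toList ++ ['X']) (if t0 ≠ 'a' then (0:Int) + 2 else 0) 0 := by
      rw [htt]
      show pvWalk ('X' :: t0 :: (tt ++ ['X'])) 0 0 = _
      rw [pvWalk_cons_na 'X' t0 (tt ++ ['X']) 0 0 (by decide)]
      rfl
    rw [hwalk, walk_eval s.toList _ 0 le_rfl (by omega)]
    have hbad := (bad_iff s.toList).1
    have haaa : ("aaa").toList = ['a','a','a'] := rfl
    by_cases hin : PySem.Str.isIn "aaa" s
    · have hinf : ['a','a','a'] <:+: s.toList := by
        have := (PySem.Str.isIn_iff_infix "aaa" s).mp hin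
        rwa [haaa] at this
      rw [if_pos hin, if_pos (hbad.mpr hinf)]
    · have hbf : pvBad 0 s.toList = false := by
        rcases hbool : pvBad 0 s.toList with _ | _
        · rfl
        · exact absurd ((PySem.Str.isIn_iff_infix "aaa" s).mpr (by rw [haaa]; exact hbad.mp hbool)) hin
      rw [if_neg hin, if_neg (by simp [hbf])]
      rw [g_eval s.toList 0 le_rfl (by omega) hbf, hlen, str_count_single]
      have hhd : s.toList.headD 'X' = t0 := by rw [htt]; rfl
      rw [hhd]
      by_cases h0 : t0 = 'a'
      · simp only [h0, ne_eq, not_true_eq_false, if_false, if_pos rfl]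
        push_cast
        ring
      · simp only [h0, ne_eq, not_false_eq_true, if_true, if_neg h0]
        push_cast
        ring
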